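-- pv_equiv track=rewrite | github.com/davidoctavius11/ai_diary | scripts/export_for_coze.py | build_diary_en
-- ===== SOURCE A (Python) =====
-- SEPARATOR = "================"
--
-- def date_label(date: str) -> str:
--     """Return date in both ISO and Chinese formats for better keyword matching."""
--     try:
--         y, m, d = date.split("-")
--         return f"{date}  {y}年{int(m)}月{int(d)}日"
--     except Exception:
--         return date
--
-- MAX_CHUNK = 4800  # stay safely under Coze's 5000-char limit
--
-- def split_text(text: str, max_len: int) -> list[str]:
--     """Split text at paragraph boundaries to stay under max_len."""
--     if len(text) <= max_len:
--         return [text]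
--     parts, current = [], []
--     for para in text.split("\n\n"):
--         if sum(len(p) for p in current) + len(para) + 2 > max_len and current:
--             parts.append("\n\n".join(current))
--             current = []
--         current.append(para)
--     if current:
--         parts.append("\n\n".join(current))
--     return parts
--
-- def build_diary_en(entries: list[dict]) -> str:
--     """English-only diary chunks, one per date (split if over 4800 chars)."""
--     entries = sorted(entries, key=lambda e: e.get("date", ""))
--     blocks = []
--     for e in entries:
--         date = e.get("date", "unknown")
--         text = e.get("content_en") or e.get("content", "")
--         header = f"Diary date: {date_label(date)}"
--         parts = split_text(text, MAX_CHUNK - len(header) - 4)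
--         for i, part in enumerate(parts):
--             suffix = f" (part {i+1}/{len(parts)})" if len(parts) > 1 else ""
--             blocks.append(f"{header}{suffix}\n\n{part}")
--     return f"\n{SEPARATOR}\n".join(blocks)
-- ===== SOURCE B (Python) =====
-- SEPARATOR = "================"
--
-- def date_label(date: str) -> str:
--     """Return date in both ISO and Chinese formats for better keyword matching."""
--     try:
--         y, m, d = date.split("-")
--         return f"{date}  {y}年{int(m)}月{int(d)}日"
--     except Exception:
--         return date
--
-- MAX_CHUNK = 4800
--
-- def _bisect_right(a, x):
--     """CPython's bisect.bisect_right loop (no imports allowed here)."""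
--     lo, hi = 0, len(a)
--     while lo < hi:
--         mid = (lo + hi) // 2
--         if x < a[mid]:
--             hi = mid
--         else:
--             lo = mid + 1
--     return lo
--
-- def _split_text(text: str, max_len: int) -> list:
--     """Prefix sums + binary search for each chunk boundary (no accumulator chunk)."""
--     if len(text) <= max_len:
--         return [text]
--     paras = text.split("\n\n")
--     pref, total = [0], 0
--     for p in paras:
--         total += len(p)
--         pref.append(total)
--     parts, i = [], 0
--     while i < len(paras):
--         j = max(_bisect_right(pref, pref[i] + max_len - 2) - 1, i + 1)
--         parts.append("\n\n".join(paras[i:j]))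
--         i = j
--     return parts
--
-- def _chunks(e):
--     header = "Diary date: " + date_label(e.get("date", "unknown"))
--     parts = _split_text(e.get("content_en") or e.get("content", ""),
--                         MAX_CHUNK - len(header) - 4)
--     if len(parts) == 1:
--         return [f"{header}\n\n{parts[0]}"]
--     return [f"{header} (part {i+1}/{len(parts)})\n\n{p}" for i, p in enumerate(parts)]
--
-- def build_diary_en(entries: list) -> str:
--     return f"\n{SEPARATOR}\n".join(
--         c
--         for e in sorted(entries, key=lambda e: e.get("date", ""))
--         for c in _chunks(e))
-- ===== Notes on version B (the rewrite author's own statement) =====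
-- stated objective: alternative
-- what changed: split_text is rebuilt around a prefix-sum array of paragraph lengths with each chunk boundary found by binary search (bisect_right) and chunks emitted as list slices, replacing A's greedy accumulate-and-flush loop over a current-chunk list; the block list is a flat per-entry comprehension instead of an accumulator loop.
import Mathlib
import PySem

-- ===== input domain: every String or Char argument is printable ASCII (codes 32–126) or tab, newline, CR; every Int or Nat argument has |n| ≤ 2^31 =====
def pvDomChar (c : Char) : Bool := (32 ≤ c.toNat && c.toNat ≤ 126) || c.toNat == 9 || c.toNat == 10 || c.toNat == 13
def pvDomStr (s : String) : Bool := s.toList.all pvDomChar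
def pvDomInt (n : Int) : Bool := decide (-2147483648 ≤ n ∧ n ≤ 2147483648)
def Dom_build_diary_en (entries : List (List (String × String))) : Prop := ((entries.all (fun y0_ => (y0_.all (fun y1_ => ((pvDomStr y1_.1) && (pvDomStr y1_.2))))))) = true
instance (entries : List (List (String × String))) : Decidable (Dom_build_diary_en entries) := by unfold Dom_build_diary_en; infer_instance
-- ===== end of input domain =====

-- B replaces A's greedy accumulate-and-flush chunker with prefix sums of paragraph lengths
-- and binary-searched (bisect_right) chunk boundaries; return value proved equal.

-- shared helper: dict.get(k, d) on an association list (first match), used by both Pythons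
def pvDictGetD (e : List (String × String)) (k d : String) : String :=
  match e.find? (fun p => p.1 == k) with
  | some p => p.2
  | none => d

-- shared helper: dict.get(k) returning Option
def pvDictGet? (e : List (String × String)) (k : String) : Option String :=
  (e.find? (fun p => p.1 == k)).map (·.2)

-- s.split(sep) for a non-empty sep (split? is none only for sep = "")
def pvSplit (s sep : String) : List String :=
  (PySem.Str.split? s sep).getD []

-- shared helper date_label (identical source in A and Source B)
def pvDateLabel (date : String) : String :=
  match pvSplit date "-" with
  | [y, m, d] =>
    match PySem.Int.ofStr? m, PySem.Int.ofStr? d with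
    | some mi, some di =>
        date ++ "  " ++ y ++ "年" ++ PySem.Int.toStr mi ++ "月" ++ PySem.Int.toStr di ++ "日"
    | _, _ => date
  | _ => date

-- text = e.get("content_en") or e.get("content", "")  (shared by both Pythons)
def pvEntryText (e : List (String × String)) : String :=
  match pvDictGet? e "content_en" with
  | some t => if t = "" then pvDictGetD e "content" "" else t
  | none => pvDictGetD e "content" ""

-- ===== PORT A =====
-- A's split_text loop body: re-sums the lengths of `current` on every paragraph
def pvSplitStepA (maxLen : Int) (st : List String × List String) (para : String) :
    List String × List String :=
  if st.2.foldl (fun a p => a + PySem.Str.len p) 0 + PySem.Str.len para + 2 > maxLen ∧ st.2 ≠ [] then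
    (st.1 ++ [PySem.Str.join "\n\n" st.2], [para])
  else (st.1, st.2 ++ [para])

def pvSplitTextA (text : String) (maxLen : Int) : List String :=
  if PySem.Str.len text ≤ maxLen then [text]
  else
    let st := (pvSplit text "\n\n").foldl (pvSplitStepA maxLen) ([], [])
    if st.2 ≠ [] then st.1 ++ [PySem.Str.join "\n\n" st.2] else st.1

-- the body of A's loop over entries (blocks accumulator)
def pvBlockStepA (blocks : List String) (e : List (String × String)) : List String :=
  let date := pvDictGetD e "date" "unknown"
  let text := pvEntryText e
  let header := "Diary date: " ++ pvDateLabel date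
  let parts := pvSplitTextA text (4800 - PySem.Str.len header - 4)
  blocks ++ (PySem.List.enumerate parts).map (fun ip =>
    let suffix := if parts.length > 1 then
        " (part " ++ PySem.Int.toStr (ip.1 + 1) ++ "/" ++ PySem.Int.toStr (parts.length : Int) ++ ")"
      else ""
    header ++ suffix ++ "\n\n" ++ ip.2)

def build_diary_en (entries : List (List (String × String))) : String :=
  let sortedE := PySem.List.sorted entries (fun e => pvDictGetD e "date" "")
  let blocks := sortedE.foldl pvBlockStepA []
  PySem.Str.join "\n================\n" blocks

-- ===== PORT B =====
-- Source B's _bisect_right is verbatim CPython's bisect_right loop, which is PySem.List.bisectRight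
-- Source B's pref/total loop: state (pref, total)
def pvPrefStep (st : List Int × Int) (p : String) : List Int × Int :=
  (st.1 ++ [st.2 + PySem.Str.len p], st.2 + PySem.Str.len p)

-- Source B's `while i < len(paras)` boundary loop; paras[i:j] with 0 ≤ i ≤ j is (drop i).take (j-i)
def pvCutLoop (paras : List String) (pref : List Int) (maxLen : Int)
    (parts : List String) (i : Nat) : List String :=
  if _h : i < paras.length then
    let j := max (PySem.List.bisectRight pref (pref.getD i 0 + maxLen - 2) - 1) (i + 1)
    pvCutLoop paras pref maxLen
      (parts ++ [PySem.Str.join "\n\n" ((paras.drop i).take (j - i))]) j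
  else parts
termination_by paras.length - i
decreasing_by omega

def pvSplitTextB (text : String) (maxLen : Int) : List String :=
  if PySem.Str.len text ≤ maxLen then [text]
  else
    let paras := pvSplit text "\n\n"
    let pref := (paras.foldl pvPrefStep ([0], 0)).1
    pvCutLoop paras pref maxLen [] 0

-- B's chunk list for given header and parts (the tail of _chunks)
def pvChunkList (header : String) (parts : List String) : List String :=
  match parts with
  | [p] => [header ++ "\n\n" ++ p]
  | _ => (PySem.List.enumerate parts).map (fun ip =>
      header ++ " (part " ++ PySem.Int.toStr (ip.1 + 1) ++ "/" ++ PySem.Int.toStr (parts.length : Int) ++ ")" ++ "\n\n" ++ ip.2)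

-- B's _chunks(e)
def pvChunks (e : List (String × String)) : List String :=
  let header := "Diary date: " ++ pvDateLabel (pvDictGetD e "date" "unknown")
  pvChunkList header (pvSplitTextB (pvEntryText e) (4800 - PySem.Str.len header - 4))

def build_diary_en_alt (entries : List (List (String × String))) : String :=
  PySem.Str.join "\n================\n"
    ((PySem.List.sorted entries (fun e => pvDictGetD e "date" "")).flatMap pvChunks)

-- ===== PRECONDITION & SPEC =====
def Spec_build_diary_en (entries : List (List (String × String))) (out : String) : Prop := out = build_diary_en_alt entries
instance (entries : List (List (String × String))) (out : String) : Decidable (Spec_build_diary_en entries out) := by unfold Spec_build_diary_en; infer_instance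

-- ===== CLAIM (what is proved, stated in full; the proofs are below) =====
def Claim_equal_build_diary_en : Prop := ∀ (entries : List (List (String × String))), Dom_build_diary_en entries → Spec_build_diary_en entries (build_diary_en entries)
-- ===== LEMMAS AND PROOFS =====

-- sum of paragraph lengths (A's inner re-summation)
def pvSumLen (cur : List String) : Int := cur.foldl (fun a p => a + PySem.Str.len p) 0

-- prefix sum of the first k paragraph lengths
def pvPsum (paras : List String) (k : Nat) : Int := pvSumLen (paras.take k)

-- the greedy chunking both programs compute, as a recursive specification:
-- take paragraphs while running total + len q + 2 ≤ maxLen, then start a new chunk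
def pvSpanSum (maxLen : Int) : Int → List String → List String × List String
  | _, [] => ([], [])
  | s, q :: rest =>
    if s + PySem.Str.len q + 2 ≤ maxLen then
      let p := pvSpanSum maxLen (s + PySem.Str.len q) rest
      (q :: p.1, p.2)
    else ([], q :: rest)

theorem pvSpanSum_snd_le (maxLen : Int) (s : Int) (rest : List String) :
    (pvSpanSum maxLen s rest).2.length ≤ rest.length := by
  induction rest generalizing s with
  | nil => simp [pvSpanSum]
  | cons q rs ih =>
    simp only [pvSpanSum]
    split_ifs
    · exact le_trans (ih _) (by simp)
    · simp

def pvChunksSpec (maxLen : Int) : List String → List String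
  | [] => []
  | p :: rest =>
    let t := pvSpanSum maxLen (PySem.Str.len p) rest
    PySem.Str.join "\n\n" (p :: t.1) :: pvChunksSpec maxLen t.2
termination_by l => l.length
decreasing_by exact Nat.lt_succ_of_le (pvSpanSum_snd_le _ _ _)

theorem pvSumLen_append (cur : List String) (p : String) :
    pvSumLen (cur ++ [p]) = pvSumLen cur + PySem.Str.len p := by
  unfold pvSumLen; rw [List.foldl_append]; rfl

theorem pvStrLen_nonneg (s : String) : 0 ≤ PySem.Str.len s := by
  simp [PySem.Str.len_eq]

theorem pvPsum_zero (paras : List String) : pvPsum paras 0 = 0 := rfl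

theorem pvSumLen_eq_sum (l : List String) :
    pvSumLen l = (l.map PySem.Str.len).sum := by
  unfold pvSumLen
  rw [PySem.List.foldl_add]
  ring

theorem pvSumLen_cons (p : String) (l : List String) :
    pvSumLen (p :: l) = PySem.Str.len p + pvSumLen l := by
  simp [pvSumLen_eq_sum]

theorem pvPsum_cons (p : String) (ps : List String) (k : Nat) :
    pvPsum (p :: ps) (k + 1) = PySem.Str.len p + pvPsum ps k := by
  unfold pvPsum
  rw [List.take_succ_cons, pvSumLen_cons]

theorem pvPsum_succ (paras : List String) (k : Nat) (h : k < paras.length) :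
    pvPsum paras (k + 1) = pvPsum paras k + PySem.Str.len paras[k] := by
  unfold pvPsum
  rw [show paras.take (k + 1) = paras.take k ++ [paras[k]] by
        rw [List.take_add_one, List.getElem?_eq_getElem h]; rfl]
  exact pvSumLen_append (paras.take k) paras[k]

theorem pvPsum_mono (paras : List String) : Monotone (pvPsum paras) := by
  apply monotone_nat_of_le_succ
  intro k
  by_cases h : k < paras.length
  · rw [pvPsum_succ paras k h]
    have := pvStrLen_nonneg paras[k]
    omega
  · unfold pvPsum
    rw [List.take_of_length_le (by omega), List.take_of_length_le (by omega)]

-- ===== A's loop equals the greedy spec =====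
theorem pvA_loop (maxLen : Int) (rest : List String) :
    ∀ (parts cur : List String), cur ≠ [] →
      (let st := rest.foldl (pvSplitStepA maxLen) (parts, cur);
       if st.2 ≠ [] then st.1 ++ [PySem.Str.join "\n\n" st.2] else st.1)
      = parts ++ (PySem.Str.join "\n\n" (cur ++ (pvSpanSum maxLen (pvSumLen cur) rest).1)
            :: pvChunksSpec maxLen (pvSpanSum maxLen (pvSumLen cur) rest).2) := by
  induction rest with
  | nil =>
    intro parts cur hcur
    simp only [List.foldl_nil, pvSpanSum, pvChunksSpec]
    rw [if_pos hcur]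
    simp
  | cons q rs ih =>
    intro parts cur hcur
    simp only [List.foldl_cons]
    have hsum : cur.foldl (fun a p => a + PySem.Str.len p) 0 = pvSumLen cur := rfl
    by_cases hc : pvSumLen cur + PySem.Str.len q + 2 ≤ maxLen
    · have hA : pvSplitStepA maxLen (parts, cur) q = (parts, cur ++ [q]) := by
        simp only [pvSplitStepA, hsum]
        rw [if_neg (fun h => absurd h.1 (by omega))]
      rw [hA]
      have := ih parts (cur ++ [q]) (by simp)
      rw [pvSumLen_append] at this
      rw [this]
      simp only [pvSpanSum, if_pos hc]
      simp
    · have hA : pvSplitStepA maxLen (parts, cur) q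
          = (parts ++ [PySem.Str.join "\n\n" cur], [q]) := by
        simp only [pvSplitStepA, hsum]
        rw [if_pos ⟨by omega, hcur⟩]
      rw [hA]
      have hq : pvSumLen [q] = PySem.Str.len q := by simp [pvSumLen]
      have := ih (parts ++ [PySem.Str.join "\n\n" cur]) [q] (by simp)
      rw [hq] at this
      rw [this]
      simp only [pvSpanSum, if_neg hc]
      conv_rhs => rw [pvChunksSpec]
      simp

theorem pvSplitTextA_eq_spec (text : String) (maxLen : Int) :
    pvSplitTextA text maxLen =
      if PySem.Str.len text ≤ maxLen then [text]
      else pvChunksSpec maxLen (pvSplit text "\n\n") := by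
  unfold pvSplitTextA
  by_cases h : PySem.Str.len text ≤ maxLen
  · rw [if_pos h, if_pos h]
  · rw [if_neg h, if_neg h]
    show (let st := (pvSplit text "\n\n").foldl (pvSplitStepA maxLen) ([], []);
          if st.2 ≠ [] then st.1 ++ [PySem.Str.join "\n\n" st.2] else st.1)
        = pvChunksSpec maxLen (pvSplit text "\n\n")
    cases hp : pvSplit text "\n\n" with
    | nil => simp [pvChunksSpec]
    | cons p ps =>
      simp only [List.foldl_cons]
      have h1 : pvSplitStepA maxLen ([], []) p = ([], [p]) := by
        simp [pvSplitStepA]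
      rw [h1]
      have hq : pvSumLen [p] = PySem.Str.len p := by simp [pvSumLen]
      have := pvA_loop maxLen ps ([] : List String) [p] (by simp)
      rw [hq] at this
      rw [this]
      conv_rhs => rw [pvChunksSpec]
      simp

-- ===== B's prefix array =====
theorem pvPref_eq_aux (paras : List String) :
    ∀ (acc : List Int) (t : Int),
      (paras.foldl pvPrefStep (acc, t)).1
        = acc ++ (List.range paras.length).map (fun k => t + pvPsum paras (k + 1)) := by
  induction paras with
  | nil => intro acc t; simp
  | cons p ps ih =>
    intro acc t
    simp only [List.foldl_cons, pvPrefStep]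
    rw [ih]
    rw [List.length_cons, List.range_succ_eq_map]
    simp only [List.map_cons, List.map_map]
    rw [List.append_assoc]
    congr 1
    simp only [List.singleton_append]
    congr 1
    · rw [pvPsum_cons]
      simp [pvPsum_zero]
    · apply List.map_congr_left
      intro k _
      simp only [Function.comp_apply, Nat.succ_eq_add_one]
      rw [pvPsum_cons]
      ring

theorem pvPref_eq (paras : List String) :
    (paras.foldl pvPrefStep ([0], 0)).1
      = (List.range (paras.length + 1)).map (pvPsum paras) := by
  rw [pvPref_eq_aux]
  rw [List.range_succ_eq_map]
  simp only [List.map_cons, List.map_map]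
  rw [show ([(0:Int)] : List Int) = [pvPsum paras 0] by rw [pvPsum_zero]]
  rw [List.singleton_append]
  congr 1
  apply List.map_congr_left
  intro k _
  simp

theorem pvPref_length (paras : List String) :
    ((paras.foldl pvPrefStep ([0], 0)).1).length = paras.length + 1 := by
  rw [pvPref_eq]; simp

theorem pvPref_getElem (paras : List String) (k : Nat) (h : k < paras.length + 1) :
    ((paras.foldl pvPrefStep ([0], 0)).1).getD k 0 = pvPsum paras k := by
  rw [pvPref_eq]
  rw [List.getD_eq_getElem _ _ (by simpa using h)]
  simp

theorem pvPref_pairwise (paras : List String) :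
    ((paras.foldl pvPrefStep ([0], 0)).1).Pairwise (fun a b => a ≤ b) := by
  rw [pvPref_eq]
  rw [List.pairwise_map]
  exact (List.pairwise_lt_range).imp (fun h => pvPsum_mono paras h.le)

-- ===== spanSum from position m, characterised by a cut point j =====
theorem pvSpan_cut (maxLen : Int) (paras : List String) (c : Int) (j : Nat)
    (hjn : j ≤ paras.length)
    (hj2 : j < paras.length → ¬ (pvPsum paras (j + 1) + c + 2 ≤ maxLen)) :
    ∀ (d m : Nat), j - m = d → m ≤ j →
      (∀ t, m ≤ t → t < j → pvPsum paras (t + 1) + c + 2 ≤ maxLen) →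
      pvSpanSum maxLen (pvPsum paras m + c) (paras.drop m)
        = ((paras.drop m).take (j - m), paras.drop j) := by
  intro d
  induction d with
  | zero =>
    intro m hd hm _
    have hmj : m = j := by omega
    subst hmj
    by_cases hn : m < paras.length
    · rw [List.drop_eq_getElem_cons hn]
      simp only [pvSpanSum]
      rw [if_neg (fun hcon => (hj2 hn) (by rw [pvPsum_succ paras m hn]; omega))]
      rw [Nat.sub_self]
      simp
    · rw [List.drop_eq_nil_of_le (by omega)]
      simp [pvSpanSum]
  | succ d ih =>
    intro m hd hm htake
    have hmj : m < j := by omega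
    have hmn : m < paras.length := by omega
    rw [List.drop_eq_getElem_cons hmn]
    simp only [pvSpanSum]
    rw [if_pos (by
      have := htake m le_rfl hmj
      rw [pvPsum_succ paras m hmn] at this
      omega)]
    have hs : pvPsum paras m + c + PySem.Str.len paras[m] = pvPsum paras (m + 1) + c := by
      rw [pvPsum_succ paras m hmn]; ring
    rw [hs]
    rw [ih (m + 1) (by omega) (by omega) (fun t ht1 ht2 => htake t (by omega) ht2)]
    have hjm : j - m = (j - (m + 1)) + 1 := by omega
    rw [hjm, List.take_succ_cons]

-- ===== B's cut loop equals the greedy spec =====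
theorem pvCutLoop_eq (maxLen : Int) (paras : List String) :
    ∀ (fuel i : Nat) (parts : List String), paras.length - i ≤ fuel →
      pvCutLoop paras (paras.foldl pvPrefStep ([0], 0)).1 maxLen parts i
        = parts ++ pvChunksSpec maxLen (paras.drop i) := by
  intro fuel
  induction fuel with
  | zero =>
    intro i parts hf
    rw [pvCutLoop, dif_neg (by omega : ¬ i < paras.length)]
    rw [List.drop_eq_nil_of_le (by omega)]
    simp [pvChunksSpec]
  | succ f ih =>
    intro i parts hf
    by_cases hin : i < paras.length
    · rw [pvCutLoop, dif_pos hin]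
      have hlen := pvPref_length paras
      have hget : ∀ (t : Nat) (hlt : t < ((paras.foldl pvPrefStep ([0], 0)).1).length),
          ((paras.foldl pvPrefStep ([0], 0)).1)[t] = pvPsum paras t := by
        intro t hlt
        rw [← List.getD_eq_getElem ((paras.foldl pvPrefStep ([0], 0)).1) 0 hlt,
            pvPref_getElem paras t (by omega)]
      rw [pvPref_getElem paras i (by omega)]
      obtain ⟨hr1, hr2, hr3⟩ :=
        PySem.List.bisectRight_spec (paras.foldl pvPrefStep ([0], 0)).1
          (pvPsum paras i + maxLen - 2) (pvPref_pairwise paras)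
      set r0 := PySem.List.bisectRight (paras.foldl pvPrefStep ([0], 0)).1
          (pvPsum paras i + maxLen - 2) with hr0
      set j := max (r0 - 1) (i + 1) with hj
      have hjn : j ≤ paras.length := by omega
      have hspan := pvSpan_cut maxLen paras (-(pvPsum paras i)) j hjn
        (by
          intro hjlt hcon
          have h3 := hr3 (j + 1) (by omega) (by omega)
          rw [hget (j + 1) (by omega)] at h3
          omega)
        (j - (i + 1)) (i + 1) rfl (by omega)
        (by
          intro t ht1 ht2
          have h2 := hr2 (t + 1) (by omega) (by omega)
          rw [hget (t + 1) (by omega)] at h2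
          omega)
      have hdi : paras.drop i = paras[i] :: paras.drop (i + 1) :=
        List.drop_eq_getElem_cons hin
      have hlenq : PySem.Str.len paras[i] = pvPsum paras (i + 1) + -(pvPsum paras i) := by
        rw [pvPsum_succ paras i hin]; ring
      have hchunk : pvChunksSpec maxLen (paras.drop i)
          = PySem.Str.join "\n\n" ((paras.drop i).take (j - i))
              :: pvChunksSpec maxLen (paras.drop j) := by
        rw [hdi]
        rw [pvChunksSpec]
        rw [hlenq, hspan]
        have hji : j - i = (j - (i + 1)) + 1 := by omega
        rw [hji, List.take_succ_cons]
      rw [ih j (parts ++ [PySem.Str.join "\n\n" ((paras.drop i).take (j - i))]) (by omega)]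
      rw [hchunk]
      simp
    · rw [pvCutLoop, dif_neg hin]
      rw [List.drop_eq_nil_of_le (by omega)]
      simp [pvChunksSpec]

theorem pvSplitText_eq (text : String) (maxLen : Int) :
    pvSplitTextB text maxLen = pvSplitTextA text maxLen := by
  rw [pvSplitTextA_eq_spec]
  unfold pvSplitTextB
  by_cases h : PySem.Str.len text ≤ maxLen
  · rw [if_pos h, if_pos h]
  · rw [if_neg h, if_neg h]
    exact pvCutLoop_eq maxLen (pvSplit text "\n\n") (pvSplit text "\n\n").length 0 []
      (by omega)

-- ===== assembling build_diary_en =====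
theorem pvChunkMap_eq (header : String) (parts : List String) :
    (PySem.List.enumerate parts).map (fun ip =>
      header ++ (if parts.length > 1 then
          " (part " ++ PySem.Int.toStr (ip.1 + 1) ++ "/" ++ PySem.Int.toStr (parts.length : Int) ++ ")"
        else "") ++ "\n\n" ++ ip.2) = pvChunkList header parts := by
  match parts with
  | [] => rfl
  | [p] =>
      simp [pvChunkList, PySem.List.enumerate_cons, PySem.List.enumerate_nil]
  | p :: q :: rest =>
      have hlen : (p :: q :: rest).length > 1 := by simp
      show _ = (PySem.List.enumerate (p :: q :: rest)).map (fun ip =>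
        header ++ " (part " ++ PySem.Int.toStr (ip.1 + 1) ++ "/" ++
          PySem.Int.toStr ((p :: q :: rest).length : Int) ++ ")" ++ "\n\n" ++ ip.2)
      apply List.map_congr_left
      intro ip _
      simp only [if_pos hlen, String.append_assoc]

theorem pvBlockStepA_eq (blocks : List String) (e : List (String × String)) :
    pvBlockStepA blocks e = blocks ++ pvChunks e := by
  simp only [pvBlockStepA, pvChunks, ← pvSplitText_eq, pvChunkMap_eq]

theorem build_diary_en_eq (entries : List (List (String × String))) :
    build_diary_en entries = build_diary_en_alt entries := by
  simp only [build_diary_en, build_diary_en_alt]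
  congr 1
  rw [PySem.List.foldl_congr_mem _ _ (fun blocks e => blocks ++ pvChunks e) []
        (fun acc x _ => pvBlockStepA_eq acc x),
      PySem.List.foldl_append_eq_flatMap]
  rfl

-- ===== VERDICT (by name: the statement is the Claim_ definition above) =====
theorem build_diary_en_spec : Claim_equal_build_diary_en := by
  intro entries _
  unfold Spec_build_diary_en
  exact build_diary_en_eq entries
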